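-- pv_equiv track=rewrite | github.com/UVCHIKORITA/BIOprep | papers/2011/q2.py | strategy_3
-- ===== SOURCE A (Python) =====
-- def find_valid_moves(values):
--     i = len(values) - 1
--     possibilities = 0
--     while i >= 1:
--         if values[i-1][0][1] == values[i][0][1] or values[i-1][0][0] == values[i][0][0]:
--             possibilities += 1
--         if i >= 3:
--             if (values[i-3][0][0] == values[i][0][0] or values[i-3][0][1] == values[i][0][1]):
--                 possibilities += 1
--         i -= 1
--     return possibilities
--
-- def strategy_3(values):
--     i = len(values) - 1
--     foundMove = False
--     maxMoves = -1
--     maxMovesSwap = []  # LEFT, RIGHT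
--     while i >= 1:
--         if values[i - 1][0][1] == values[i][0][1] or values[i - 1][0][0] == values[i][0][0]:
--             foundMove = True
--             tempvalues = list(values)
--             tempvalues[i - 1] = [tempvalues[i][0], 1]
--             k = find_valid_moves(tempvalues)
--             if k > maxMoves:
--                 maxMoves = k
--                 maxMovesSwap = [i - 1, i]
--         if i >= 3:
--             if values[i - 3][0][0] == values[i][0][0] or values[i - 3][0][1] == values[i][0][1]:
--                 foundMove = True
--                 tempvalues = list(values)
--                 tempvalues[i - 3] = [tempvalues[i][0], 1]
--                 k = find_valid_moves(tempvalues)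
--                 if k > maxMoves:
--                     maxMoves = k
--                     maxMovesSwap = [i - 3, i]
--         i -= 1
--     if foundMove:
--         values[maxMovesSwap[0]] = [values[maxMovesSwap[1]][0], 1]
--         values.pop(maxMovesSwap[1])
--     else:
--         return str(str(len(values)) + " " + values[0][0])
--     return strategy_3(values)
-- ===== SOURCE B (Python) =====
-- # B: same greedy simulation, but the valid-move count after each candidate merge is
-- # obtained as base-count + O(1) incremental delta instead of a full recount (O(n^2) total
-- # vs A's O(n^3)); iterative loop over a list of strings instead of recursion; does not
-- # mutate the caller's list (A does).
--
-- def _mt(a, b):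
--     return a[0] == b[0] or a[1] == b[1]
--
-- def _delta(strs, j, s):
--     # change in the valid-move count when strs[j] is replaced by s
--     n = len(strs)
--     old = strs[j]
--     d = 0
--     if j >= 1:
--         d += int(_mt(strs[j - 1], s)) - int(_mt(strs[j - 1], old))
--     if j + 1 <= n - 1:
--         d += int(_mt(strs[j + 1], s)) - int(_mt(strs[j + 1], old))
--     if j >= 3:
--         d += int(_mt(strs[j - 3], s)) - int(_mt(strs[j - 3], old))
--     if j + 3 <= n - 1:
--         d += int(_mt(strs[j + 3], s)) - int(_mt(strs[j + 3], old))
--     return d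
--
-- def strategy_3(values):
--     strs = [v[0] for v in values]
--     while True:
--         n = len(strs)
--         base = 0
--         for t in range(1, n):
--             if strs[t - 1][1] == strs[t][1] or strs[t - 1][0] == strs[t][0]:
--                 base += 1
--             if t >= 3 and (strs[t - 3][0] == strs[t][0] or strs[t - 3][1] == strs[t][1]):
--                 base += 1
--         best = None  # (moves, left, right)
--         for i in range(n - 1, 0, -1):
--             if strs[i - 1][1] == strs[i][1] or strs[i - 1][0] == strs[i][0]:
--                 k = base + _delta(strs, i - 1, strs[i])
--                 if best is None or k > best[0]:
--                     best = (k, i - 1, i)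
--             if i >= 3 and (strs[i - 3][0] == strs[i][0] or strs[i - 3][1] == strs[i][1]):
--                 k = base + _delta(strs, i - 3, strs[i])
--                 if best is None or k > best[0]:
--                     best = (k, i - 3, i)
--         if best is None:
--             return str(n) + " " + strs[0]
--         _, j, i = best
--         strs[j] = strs[i]
--         strs.pop(i)
-- ===== Notes on version B (the rewrite author's own statement) =====
-- stated objective: faster
-- what changed: B computes the valid-move count of the current list once per round and evaluates each candidate merge with a constant-size incremental delta (only the up-to-4 comparison terms touching the replaced index change), instead of A's full O(n) recount per candidate, and replaces A's recursion over mutated pair-lists with an iterative loop over the list of strings; B does not mutate the caller's list (A does, and the equivalence is about the return value).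
import Mathlib
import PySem

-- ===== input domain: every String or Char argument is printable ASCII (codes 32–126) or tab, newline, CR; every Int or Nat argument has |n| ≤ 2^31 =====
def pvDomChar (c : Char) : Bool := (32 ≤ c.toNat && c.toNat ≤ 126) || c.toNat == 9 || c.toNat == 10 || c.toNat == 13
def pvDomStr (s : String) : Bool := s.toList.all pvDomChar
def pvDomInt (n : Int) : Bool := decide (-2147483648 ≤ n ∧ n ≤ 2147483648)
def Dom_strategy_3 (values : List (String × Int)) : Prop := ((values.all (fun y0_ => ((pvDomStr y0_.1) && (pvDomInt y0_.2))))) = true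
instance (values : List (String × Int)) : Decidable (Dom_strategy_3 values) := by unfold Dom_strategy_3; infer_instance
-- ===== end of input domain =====

-- B replaces A's full O(n) move-recount per candidate merge by a base count plus a
-- constant-size delta, and A's recursion by an iterative loop over the strings (objective:
-- faster). A mutates its argument in place; B does not — the equivalence proved here is
-- about the RETURN value only.

-- ===== PORT A =====
-- values[t][0]  (string of the pair; default unreachable under Pre_, indices stay in range)
def getA (l : List (String × Int)) (t : Nat) : String := (l.getD t ("", 0)).1
-- s[k]  (k = 0 or 1; default unreachable under Pre_, which demands length ≥ 2 where accessed)
def chA (s : String) (k : Nat) : Char := s.toList.getD k ' '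
-- values[t-1][0][1] == values[t][0][1] or values[t-1][0][0] == values[t][0][0]
def adjA (l : List (String × Int)) (t : Nat) : Bool :=
  (chA (getA l (t-1)) 1 == chA (getA l t) 1) || (chA (getA l (t-1)) 0 == chA (getA l t) 0)
-- values[t-3][0][0] == values[t][0][0] or values[t-3][0][1] == values[t][0][1]
def thrA (l : List (String × Int)) (t : Nat) : Bool :=
  (chA (getA l (t-3)) 0 == chA (getA l t) 0) || (chA (getA l (t-3)) 1 == chA (getA l t) 1)

-- the while-loop of find_valid_moves, i counting down
def fvmA (l : List (String × Int)) : Nat → Int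
  | 0 => 0
  | i+1 => (if adjA l (i+1) then 1 else 0) + (if 3 ≤ i+1 ∧ thrA l (i+1) then 1 else 0) + fvmA l i

def find_valid_moves (l : List (String × Int)) : Int := fvmA l (l.length - 1)

-- one iteration of strategy_3's while-loop; state = (foundMove, maxMoves, maxMovesSwap)
def stepA (l : List (String × Int)) (i : Nat) (st : Bool × Int × Option (Nat × Nat)) :
    Bool × Int × Option (Nat × Nat) :=
  let st1 := if adjA l i then
      let k := find_valid_moves (l.set (i-1) (getA l i, 1))
      if k > st.2.1 then (true, k, some (i-1, i)) else (true, st.2.1, st.2.2)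
    else st
  if 3 ≤ i ∧ thrA l i then
    let k := find_valid_moves (l.set (i-3) (getA l i, 1))
    if k > st1.2.1 then (true, k, some (i-3, i)) else (true, st1.2.1, st1.2.2)
  else st1

def loopA (l : List (String × Int)) : Nat → Bool × Int × Option (Nat × Nat) → Bool × Int × Option (Nat × Nat)
  | 0, st => st
  | i+1, st => loopA l i (stepA l (i+1) st)

-- invariant needed by strategy_3's termination: any stored swap has 1 ≤ right ≤ n
theorem stepA_swap (l : List (String × Int)) (n i : Nat) (st : Bool × Int × Option (Nat × Nat))
    (hst : ∀ p, st.2.2 = some p → 1 ≤ p.2 ∧ p.2 ≤ n) (h1 : 1 ≤ i) (h2 : i ≤ n) :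
    ∀ p, (stepA l i st).2.2 = some p → 1 ≤ p.2 ∧ p.2 ≤ n := by
  intro p hp
  unfold stepA at hp
  obtain ⟨f, m, sw⟩ := st
  rcases sw with _ | ⟨j0, i0⟩
  · dsimp only at hp
    repeat' split at hp
    all_goals first
      | (injection hp with hp; subst hp; refine ⟨?_, ?_⟩ <;> (dsimp only; omega))
      | (simp at hp)
  · obtain ⟨hq1, hq2⟩ := hst (j0, i0) rfl
    dsimp only at hq1 hq2 hp
    repeat' split at hp
    all_goals injection hp with hp
    all_goals subst hp
    all_goals refine ⟨?_, ?_⟩ <;> (dsimp only; omega)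

theorem loopA_swap (l : List (String × Int)) (n : Nat) :
    ∀ (i : Nat) (st : Bool × Int × Option (Nat × Nat)), i ≤ n →
      (∀ p, st.2.2 = some p → 1 ≤ p.2 ∧ p.2 ≤ n) →
      ∀ p, (loopA l i st).2.2 = some p → 1 ≤ p.2 ∧ p.2 ≤ n := by
  intro i
  induction i with
  | zero => intro st _ hst p hp; exact hst p hp
  | succ i ih =>
    intro st hi hst p hp
    exact ih _ (by omega) (stepA_swap l n (i+1) st hst (by omega) hi) p hp

def strategy_3 (values : List (String × Int)) : String :=
  let res := loopA values (values.length - 1) (false, -1, none)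
  if res.1 then
    match hsw : res.2.2 with
    | some (j, i) => strategy_3 ((values.set j (getA values i, 1)).eraseIdx i)
    | none => ""  -- unreachable: foundMove implies a stored swap (Python would raise there)
  else PySem.Int.toStr values.length ++ " " ++ getA values 0
termination_by values.length
decreasing_by
  have h := loopA_swap values (values.length - 1) (values.length - 1) (false, -1, none)
      le_rfl (by intro p hp; simp at hp) (j, i) hsw
  have hi : i < values.length := by omega
  simp [List.length_eraseIdx, List.length_set, hi]
  omega

-- ===== PORT B =====
def chB (s : String) (k : Nat) : Char := s.toList.getD k ' '
def getB (l : List String) (t : Nat) : String := l.getD t ""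
def adjB (l : List String) (t : Nat) : Bool :=
  (chB (getB l (t-1)) 1 == chB (getB l t) 1) || (chB (getB l (t-1)) 0 == chB (getB l t) 0)
def thrB (l : List String) (t : Nat) : Bool :=
  (chB (getB l (t-3)) 0 == chB (getB l t) 0) || (chB (getB l (t-3)) 1 == chB (getB l t) 1)
-- _mt(a, b)
def mtB (a b : String) : Bool := (chB a 0 == chB b 0) || (chB a 1 == chB b 1)
-- int(bool)
def ind (b : Bool) : Int := if b then 1 else 0

-- _delta(strs, j, s)
def deltaB (l : List String) (j : Nat) (s : String) : Int :=
  let n := l.length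
  let old := getB l j
  (if 1 ≤ j then ind (mtB (getB l (j-1)) s) - ind (mtB (getB l (j-1)) old) else 0) +
  (if j + 1 ≤ n - 1 then ind (mtB (getB l (j+1)) s) - ind (mtB (getB l (j+1)) old) else 0) +
  (if 3 ≤ j then ind (mtB (getB l (j-3)) s) - ind (mtB (getB l (j-3)) old) else 0) +
  (if j + 3 ≤ n - 1 then ind (mtB (getB l (j+3)) s) - ind (mtB (getB l (j+3)) old) else 0)

-- base move count: for t in range(1, n)
def baseB (l : List String) : Int :=
  (List.range' 1 (l.length - 1)).foldl
    (fun acc t => (acc + (if adjB l t then 1 else 0)) + (if 3 ≤ t ∧ thrB l t then 1 else 0)) 0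

-- one i of the candidate scan; best = some (moves, left, right)
def stepB (l : List String) (base : Int) (i : Nat) (best : Option (Int × Nat × Nat)) :
    Option (Int × Nat × Nat) :=
  let b1 := if adjB l i then
      let k := base + deltaB l (i-1) (getB l i)
      match best with
      | none => some (k, i-1, i)
      | some (k0, p) => if k > k0 then some (k, i-1, i) else some (k0, p)
    else best
  if 3 ≤ i ∧ thrB l i then
    let k := base + deltaB l (i-3) (getB l i)
    match b1 with
    | none => some (k, i-3, i)
    | some (k0, p) => if k > k0 then some (k, i-3, i) else some (k0, p)
  else b1

def loopB (l : List String) (base : Int) : Nat → Option (Int × Nat × Nat) → Option (Int × Nat × Nat)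
  | 0, b => b
  | i+1, b => loopB l base i (stepB l base (i+1) b)

-- termination invariant for runB: any stored best has 1 ≤ right ≤ n
theorem stepB_swap (l : List String) (base : Int) (n i : Nat) (b : Option (Int × Nat × Nat))
    (hb : ∀ p, b = some p → 1 ≤ p.2.2 ∧ p.2.2 ≤ n) (h1 : 1 ≤ i) (h2 : i ≤ n) :
    ∀ p, stepB l base i b = some p → 1 ≤ p.2.2 ∧ p.2.2 ≤ n := by
  intro p hp
  unfold stepB at hp
  rcases b with _ | ⟨k0, q⟩
  · by_cases hA : adjB l i = true
    · rw [if_pos hA] at hp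
      dsimp only at hp
      repeat' split at hp
      all_goals first
        | (injection hp with hp; subst hp; refine ⟨?_, ?_⟩ <;> (dsimp only; omega))
    · rw [if_neg hA] at hp
      dsimp only at hp
      repeat' split at hp
      all_goals first
        | (injection hp with hp; subst hp; refine ⟨?_, ?_⟩ <;> (dsimp only; omega))
        | (simp at hp)
  · obtain ⟨hq1, hq2⟩ := hb (k0, q) rfl
    dsimp only at hq1 hq2
    by_cases hA : adjB l i = true
    · rw [if_pos hA] at hp
      dsimp only at hp
      by_cases hk : base + deltaB l (i-1) (getB l i) > k0
      · rw [if_pos hk] at hp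
        dsimp only at hp
        repeat' split at hp
        all_goals first
          | (injection hp with hp; subst hp; refine ⟨?_, ?_⟩ <;> (dsimp only; omega))
      · rw [if_neg hk] at hp
        dsimp only at hp
        repeat' split at hp
        all_goals first
          | (injection hp with hp; subst hp; refine ⟨?_, ?_⟩ <;> (dsimp only; omega))
    · rw [if_neg hA] at hp
      dsimp only at hp
      repeat' split at hp
      all_goals first
        | (injection hp with hp; subst hp; refine ⟨?_, ?_⟩ <;> (dsimp only; omega))

theorem loopB_swap (l : List String) (base : Int) (n : Nat) :
    ∀ (i : Nat) (b : Option (Int × Nat × Nat)), i ≤ n →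
      (∀ p, b = some p → 1 ≤ p.2.2 ∧ p.2.2 ≤ n) →
      ∀ p, loopB l base i b = some p → 1 ≤ p.2.2 ∧ p.2.2 ≤ n := by
  intro i
  induction i with
  | zero => intro b _ hb p hp; exact hb p hp
  | succ i ih =>
    intro b hi hb p hp
    exact ih _ (by omega) (stepB_swap l base n (i+1) b hb (by omega) hi) p hp

def runB (strs : List String) : String :=
  match hb : loopB strs (baseB strs) (strs.length - 1) none with
  | none => PySem.Int.toStr strs.length ++ " " ++ getB strs 0
  | some (_, j, i) => runB ((strs.set j (getB strs i)).eraseIdx i)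
termination_by strs.length
decreasing_by
  have h := loopB_swap strs (baseB strs) (strs.length - 1) (strs.length - 1) none
      le_rfl (by intro p hp; simp at hp) _ hb
  have h' : 1 ≤ i ∧ i ≤ strs.length - 1 := h
  have hi : i < strs.length := by omega
  simp [List.length_eraseIdx, List.length_set, hi]
  omega

def strategy_3_alt (values : List (String × Int)) : String := runB (values.map (fun v => v.1))

-- ===== PRECONDITION & SPEC =====
-- Pre_ excludes exactly the inputs where Python A raises IndexError: the empty list
-- (values[0] in the no-move return) and, for length ≥ 2, any card string shorter than
-- 2 characters (the comparisons read s[1] of every element).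
def Pre_strategy_3 (values : List (String × Int)) : Prop :=
  values ≠ [] ∧ (values.length = 1 ∨ ∀ p ∈ values, 2 ≤ p.1.toList.length)
instance (values : List (String × Int)) : Decidable (Pre_strategy_3 values) := by
  unfold Pre_strategy_3; infer_instance

def pvWitness_strategy_3 : (List (String × Int)) := [("ab", 1), ("cb", 2)]

def Spec_strategy_3 (values : List (String × Int)) (out : String) : Prop := out = strategy_3_alt values
instance (values : List (String × Int)) (out : String) : Decidable (Spec_strategy_3 values out) := by
  unfold Spec_strategy_3; infer_instance

-- ===== CLAIM (what is proved, stated in full; the proofs are below) =====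
def Claim_equal_strategy_3 : Prop := ∀ (values : List (String × Int)), Dom_strategy_3 values → Pre_strategy_3 values → Spec_strategy_3 values (strategy_3 values)

-- ===== LEMMAS AND PROOFS =====

-- ---- bridge: B's string list is A's pair list through Prod.fst ----
theorem getB_map (l : List (String × Int)) (t : Nat) :
    getB (l.map (fun v => v.1)) t = getA l t := by
  cases h : l[t]? with
  | none =>
    simp [getB, getA, List.getD_eq_getElem?_getD, h]
  | some p =>
    simp [getB, getA, List.getD_eq_getElem?_getD, h]

theorem adjB_map (l : List (String × Int)) (t : Nat) :
    adjB (l.map (fun v => v.1)) t = adjA l t := by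
  simp [adjB, adjA, chB, chA, getB_map]

theorem thrB_map (l : List (String × Int)) (t : Nat) :
    thrB (l.map (fun v => v.1)) t = thrA l t := by
  simp [thrB, thrA, chB, chA, getB_map]

-- ---- canonical per-index term and its sum (proof-side view of both counts) ----
def termS (l : List String) (t : Nat) : Int :=
  (if adjB l t then 1 else 0) + (if 3 ≤ t ∧ thrB l t then 1 else 0)

def fvmS (l : List String) : Nat → Int
  | 0 => 0
  | m+1 => termS l (m+1) + fvmS l m

-- the four elementary deltas of replacing index j by s
def e1 (l : List String) (j : Nat) (s : String) : Int :=
  ind (mtB (getB l (j-1)) s) - ind (mtB (getB l (j-1)) (getB l j))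
def e2 (l : List String) (j : Nat) (s : String) : Int :=
  ind (mtB (getB l (j+1)) s) - ind (mtB (getB l (j+1)) (getB l j))
def e3 (l : List String) (j : Nat) (s : String) : Int :=
  ind (mtB (getB l (j-3)) s) - ind (mtB (getB l (j-3)) (getB l j))
def e4 (l : List String) (j : Nat) (s : String) : Int :=
  ind (mtB (getB l (j+3)) s) - ind (mtB (getB l (j+3)) (getB l j))

-- delta contributed by the term at index t
def dS (l : List String) (j : Nat) (s : String) (t : Nat) : Int :=
  (if t = j then e1 l j s else if t = j+1 then e2 l j s else 0) +
  (if t = j then (if 3 ≤ j then e3 l j s else 0) else if t = j+3 then e4 l j s else 0)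

def DS (l : List String) (j : Nat) (s : String) : Nat → Int
  | 0 => 0
  | m+1 => DS l j s m + dS l j s (m+1)

theorem ite_and_one {p : Prop} [Decidable p] (b : Bool) :
    (if p ∧ b = true then (1:Int) else 0) = if p then (if b = true then (1:Int) else 0) else 0 := by
  by_cases hp : p <;> by_cases hb : b = true <;> simp [hp, hb]

set_option maxHeartbeats 1000000 in
theorem DS_closed (l : List String) (j : Nat) (s : String) : ∀ m : Nat,
    DS l j s m = (if 1 ≤ j ∧ j ≤ m then e1 l j s else 0) + (if j+1 ≤ m then e2 l j s else 0) +
      (if 3 ≤ j ∧ j ≤ m then e3 l j s else 0) + (if j+3 ≤ m then e4 l j s else 0) := by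
  intro m
  induction m with
  | zero => simp [DS]; split_ifs <;> omega
  | succ m ih =>
    simp only [DS, ih, dS]
    split_ifs <;> omega

theorem getB_set_ne (l : List String) (j t : Nat) (s : String) (h : t ≠ j) :
    getB (l.set j s) t = getB l t := by
  simp [getB, List.getD_eq_getElem?_getD, List.getElem?_set_ne (Ne.symm h)]

theorem getB_set_self (l : List String) (j : Nat) (s : String) (h : j < l.length) :
    getB (l.set j s) j = s := by
  simp [getB, List.getD_eq_getElem?_getD, List.getElem?_set_self h]

theorem termS_set (l : List String) (j : Nat) (s : String) (hj : j < l.length) (t : Nat)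
    (ht : 1 ≤ t) : termS (l.set j s) t = termS l t + dS l j s t := by
  by_cases h1 : t = j
  · subst h1
    have hga : getB (l.set t s) (t-1) = getB l (t-1) := getB_set_ne l t (t-1) s (by omega)
    have hgs : getB (l.set t s) t = s := getB_set_self l t s hj
    have ha : adjB (l.set t s) t = mtB (getB l (t-1)) s := by
      simp [adjB, mtB, chB, hga, hgs, Bool.or_comm]
    have ha' : adjB l t = mtB (getB l (t-1)) (getB l t) := by
      simp [adjB, mtB, chB, Bool.or_comm]
    by_cases h3 : 3 ≤ t
    · have hg3 : getB (l.set t s) (t-3) = getB l (t-3) := getB_set_ne l t (t-3) s (by omega)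
      have hth : thrB (l.set t s) t = mtB (getB l (t-3)) s := by
        simp [thrB, mtB, chB, hg3, hgs]
      have hth' : thrB l t = mtB (getB l (t-3)) (getB l t) := by
        simp [thrB, mtB, chB]
      simp only [termS, dS, ha, ha', hth, hth', e1, e3, if_pos h3, ind, ite_and_one]
      all_goals split_ifs <;> omega
    · simp only [termS, dS, ha, ha', e1, if_neg h3, ind]
      have hn1 : ¬ (3 ≤ t ∧ thrB (l.set t s) t = true) := by tauto
      have hn2 : ¬ (3 ≤ t ∧ thrB l t = true) := by tauto
      rw [if_neg hn1, if_neg hn2]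
      split_ifs <;> omega
  · by_cases h2 : t = j + 1
    · subst h2
      have hga : getB (l.set j s) (j+1) = getB l (j+1) := getB_set_ne l j (j+1) s (by omega)
      have hgs : getB (l.set j s) j = s := getB_set_self l j s hj
      have ha : adjB (l.set j s) (j+1) = mtB (getB l (j+1)) s := by
        simp [adjB, mtB, chB, hga, hgs, Bool.or_comm, Bool.beq_comm]
      have ha' : adjB l (j+1) = mtB (getB l (j+1)) (getB l j) := by
        simp [adjB, mtB, chB, Bool.or_comm, Bool.beq_comm]
      have hth : (if 3 ≤ j+1 ∧ thrB (l.set j s) (j+1) then (1:Int) else 0) =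
          (if 3 ≤ j+1 ∧ thrB l (j+1) then (1:Int) else 0) := by
        by_cases h3 : 3 ≤ j + 1
        · have hx : thrB (l.set j s) (j+1) = thrB l (j+1) := by
            simp [thrB, getB_set_ne l j (j-2) s (by omega), hga]
          rw [hx]
        · rw [if_neg (by tauto), if_neg (by tauto)]
      simp only [termS, dS, ha, ha', hth, e2, if_neg (by omega : ¬ j+1 = j),
        if_neg (by omega : ¬ j+1 = j+3), ind]
      all_goals split_ifs <;> omega
    · have ha : adjB (l.set j s) t = adjB l t := by
        simp [adjB, getB_set_ne l j (t-1) s (by omega), getB_set_ne l j t s h1]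
      by_cases h4 : t = j + 3
      · subst h4
        have hgs : getB (l.set j s) j = s := getB_set_self l j s hj
        have hg4 : getB (l.set j s) (j+3) = getB l (j+3) := getB_set_ne l j (j+3) s (by omega)
        have hth : thrB (l.set j s) (j+3) = mtB (getB l (j+3)) s := by
          simp [thrB, mtB, chB, hgs, hg4, Bool.beq_comm]
        have hth' : thrB l (j+3) = mtB (getB l (j+3)) (getB l j) := by
          simp [thrB, mtB, chB, Bool.beq_comm]
        simp only [termS, dS, ha, hth, hth', e4, if_neg (by omega : ¬ j+3 = j),
          if_neg (by omega : ¬ j+3 = j+1), if_pos (by omega : 3 ≤ j+3), ind,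
          ite_and_one]
        all_goals split_ifs <;> omega
      · have hth : (if 3 ≤ t ∧ thrB (l.set j s) t then (1:Int) else 0) =
            (if 3 ≤ t ∧ thrB l t then (1:Int) else 0) := by
          by_cases h3 : 3 ≤ t
          · have hx : thrB (l.set j s) t = thrB l t := by
              simp [thrB, getB_set_ne l j (t-3) s (by omega), getB_set_ne l j t s h1]
            rw [hx]
          · rw [if_neg (by tauto), if_neg (by tauto)]
        simp only [termS, dS, ha, hth, if_neg h1, if_neg h2, if_neg h4]
        omega

theorem fvmS_set (l : List String) (j : Nat) (s : String) (hj : j < l.length) :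
    ∀ m, fvmS (l.set j s) m = fvmS l m + DS l j s m := by
  intro m
  induction m with
  | zero => simp [fvmS, DS]
  | succ m ih =>
    simp only [fvmS, DS, ih, termS_set l j s hj (m+1) (by omega)]
    ring

theorem deltaB_eq_DS (l : List String) (j : Nat) (s : String) (hj : j ≤ l.length - 1) :
    deltaB l j s = DS l j s (l.length - 1) := by
  rw [DS_closed]
  simp only [deltaB, e1, e2, e3, e4]
  split_ifs <;> omega

theorem fvmA_eq (l : List (String × Int)) : ∀ m, fvmA l m = fvmS (l.map (fun v => v.1)) m := by
  intro m
  induction m with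
  | zero => rfl
  | succ m ih => simp only [fvmA, fvmS, termS, ih, adjB_map, thrB_map]

theorem baseB_eq (l : List String) : baseB l = fvmS l (l.length - 1) := by
  have aux : ∀ m, (List.range' 1 m).foldl
      (fun acc t => (acc + (if adjB l t then 1 else 0)) + (if 3 ≤ t ∧ thrB l t then 1 else 0)) 0
      = fvmS l m := by
    intro m
    induction m with
    | zero => rfl
    | succ m ih =>
      rw [List.range'_1_concat, List.foldl_append, ih]
      simp only [List.foldl_cons, List.foldl_nil, fvmS, termS]
      have : 1 + m = m + 1 := by omega
      rw [this]; ring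
  exact aux _

theorem fvmS_nonneg (l : List String) : ∀ m, 0 ≤ fvmS l m := by
  intro m
  induction m with
  | zero => simp [fvmS]
  | succ m ih =>
    have : 0 ≤ termS l (m+1) := by unfold termS; split_ifs <;> omega
    simp only [fvmS]; omega

theorem fvm_nonneg (l : List (String × Int)) : 0 ≤ find_valid_moves l := by
  unfold find_valid_moves
  rw [fvmA_eq]
  exact fvmS_nonneg _ _

-- the candidate value A recomputes equals B's base + delta
theorem cand_eq (l : List (String × Int)) (j i' : Nat) (hj : j < l.length) :
    find_valid_moves (l.set j (getA l i', 1)) =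
      baseB (l.map (fun v => v.1)) + deltaB (l.map (fun v => v.1)) j (getB (l.map (fun v => v.1)) i') := by
  have hlen : (l.map (fun v => v.1)).length = l.length := List.length_map ..
  rw [getB_map]
  unfold find_valid_moves
  rw [fvmA_eq, List.map_set, List.length_set]
  have hj' : j < (l.map (fun v => v.1)).length := by omega
  rw [show (l.map (fun v => v.1)).set j (getA l i', 1).1 = (l.map (fun v => v.1)).set j (getA l i') from rfl]
  rw [fvmS_set _ _ _ hj', baseB_eq, deltaB_eq_DS _ _ _ (by omega), hlen]

-- ---- loop correspondence ----
def RelAB (st : Bool × Int × Option (Nat × Nat)) (b : Option (Int × Nat × Nat)) : Prop :=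
  (st = (false, -1, none) ∧ b = none) ∨ (∃ k j i, st = (true, k, some (j, i)) ∧ b = some (k, j, i))

theorem step_corr (l : List (String × Int)) (i : Nat) (h1 : 1 ≤ i) (h2 : i ≤ l.length - 1)
    (st : Bool × Int × Option (Nat × Nat)) (b : Option (Int × Nat × Nat)) (h : RelAB st b) :
    RelAB (stepA l i st)
      (stepB (l.map (fun v => v.1)) (baseB (l.map (fun v => v.1))) i b) := by
  have hc1 := cand_eq l (i-1) i (by omega)
  have hc3 := cand_eq l (i-3) i (by omega)
  unfold stepA stepB
  rw [adjB_map, thrB_map, ← hc1, ← hc3]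
  set k1 := find_valid_moves (l.set (i-1) (getA l i, 1)) with hk1
  set k3 := find_valid_moves (l.set (i-3) (getA l i, 1)) with hk3
  have hn1 : 0 ≤ k1 := fvm_nonneg _
  have hn3 : 0 ≤ k3 := fvm_nonneg _
  rcases h with ⟨hst, hb⟩ | ⟨k0, j0, i0, hst, hb⟩ <;> subst hst <;> subst hb <;> try dsimp only
  · by_cases hA : adjA l i = true
    · rw [if_pos hA, if_pos hA, if_pos (show k1 > -1 by omega)]
      by_cases hT : 3 ≤ i ∧ thrA l i = true
      · rw [if_pos hT, if_pos hT]
        try dsimp only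
        by_cases hcmp : k3 > k1
        · rw [if_pos hcmp, if_pos hcmp]
          exact Or.inr ⟨k3, i-3, i, rfl, rfl⟩
        · rw [if_neg hcmp, if_neg hcmp]
          exact Or.inr ⟨k1, i-1, i, rfl, rfl⟩
      · rw [if_neg hT, if_neg hT]
        exact Or.inr ⟨k1, i-1, i, rfl, rfl⟩
    · rw [if_neg hA, if_neg hA]
      by_cases hT : 3 ≤ i ∧ thrA l i = true
      · rw [if_pos hT, if_pos hT]
        try dsimp only
        rw [if_pos (show k3 > -1 by omega)]
        exact Or.inr ⟨k3, i-3, i, rfl, rfl⟩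
      · rw [if_neg hT, if_neg hT]
        exact Or.inl ⟨rfl, rfl⟩
  · by_cases hA : adjA l i = true
    · rw [if_pos hA, if_pos hA]
      try dsimp only
      by_cases hcA : k1 > k0
      · rw [if_pos hcA, if_pos hcA]
        by_cases hT : 3 ≤ i ∧ thrA l i = true
        · rw [if_pos hT, if_pos hT]
          try dsimp only
          by_cases hcmp : k3 > k1
          · rw [if_pos hcmp, if_pos hcmp]
            exact Or.inr ⟨k3, i-3, i, rfl, rfl⟩
          · rw [if_neg hcmp, if_neg hcmp]
            exact Or.inr ⟨k1, i-1, i, rfl, rfl⟩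
        · rw [if_neg hT, if_neg hT]
          exact Or.inr ⟨k1, i-1, i, rfl, rfl⟩
      · rw [if_neg hcA, if_neg hcA]
        by_cases hT : 3 ≤ i ∧ thrA l i = true
        · rw [if_pos hT, if_pos hT]
          try dsimp only
          by_cases hcmp : k3 > k0
          · rw [if_pos hcmp, if_pos hcmp]
            exact Or.inr ⟨k3, i-3, i, rfl, rfl⟩
          · rw [if_neg hcmp, if_neg hcmp]
            exact Or.inr ⟨k0, j0, i0, rfl, rfl⟩
        · rw [if_neg hT, if_neg hT]
          exact Or.inr ⟨k0, j0, i0, rfl, rfl⟩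
    · rw [if_neg hA, if_neg hA]
      by_cases hT : 3 ≤ i ∧ thrA l i = true
      · rw [if_pos hT, if_pos hT]
        try dsimp only
        by_cases hcmp : k3 > k0
        · rw [if_pos hcmp, if_pos hcmp]
          exact Or.inr ⟨k3, i-3, i, rfl, rfl⟩
        · rw [if_neg hcmp, if_neg hcmp]
          exact Or.inr ⟨k0, j0, i0, rfl, rfl⟩
      · rw [if_neg hT, if_neg hT]
        exact Or.inr ⟨k0, j0, i0, rfl, rfl⟩

theorem loop_corr (l : List (String × Int)) :
    ∀ (i : Nat) (st : Bool × Int × Option (Nat × Nat)) (b : Option (Int × Nat × Nat)),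
      i ≤ l.length - 1 → RelAB st b →
      RelAB (loopA l i st) (loopB (l.map (fun v => v.1)) (baseB (l.map (fun v => v.1))) i b) := by
  intro i
  induction i with
  | zero => intro st b _ h; exact h
  | succ i ih =>
    intro st b hi h
    exact ih _ _ (by omega) (step_corr l (i+1) (by omega) hi st b h)

theorem main_strategy_3 : ∀ (n : Nat) (values : List (String × Int)), values.length = n →
    strategy_3 values = runB (values.map (fun v => v.1)) := by
  intro n
  induction n using Nat.strong_induction_on with
  | _ n ih =>
    intro values hlen
    have hrel := loop_corr values (values.length - 1) (false, -1, none) none le_rfl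
      (Or.inl ⟨rfl, rfl⟩)
    have hmaplen : (values.map (fun v => v.1)).length = values.length := List.length_map ..
    rw [strategy_3, runB.eq_def]
    rcases hrel with ⟨hA, hB⟩ | ⟨k, j, i, hA, hB⟩
    · rw [if_neg (show ¬ ((loopA values (values.length - 1) (false, -1, none)).1 = true) from by
        rw [hA]; simp)]
      split
      · rw [hmaplen, getB_map]
      · rename_i heq
        rw [hmaplen, hB] at heq
        simp at heq
    · rw [if_pos (show (loopA values (values.length - 1) (false, -1, none)).1 = true from by
        rw [hA])]
      have hbnd := loopA_swap values (values.length - 1) (values.length - 1) (false, -1, none)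
        le_rfl (by intro p hp; simp at hp) (j, i) (by rw [hA])
      split
      · rename_i j' i' heq
        rw [hA] at heq
        obtain ⟨rfl, rfl⟩ : j = j' ∧ i = i' := by simpa using heq
        split
        · rename_i heq2
          rw [hmaplen, hB] at heq2
          simp at heq2
        · rename_i fst j2 i2 heq2
          rw [hmaplen, hB] at heq2
          obtain ⟨rfl, rfl, rfl⟩ : k = fst ∧ j = j2 ∧ i = i2 := by simpa using heq2
          have hlist : ((values.map (fun v => v.1)).set j (getB (values.map (fun v => v.1)) i)).eraseIdx i
              = ((values.set j (getA values i, 1)).eraseIdx i).map (fun v => v.1) := by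
            rw [getB_map]
            rw [show ((values.set j (getA values i, 1)).eraseIdx i).map (fun v => v.1)
                = (((values.set j (getA values i, 1)).map (fun v => v.1)).eraseIdx i) from
              (List.eraseIdx_map _ _ _).symm]
            rw [List.map_set]
          rw [hlist]
          have hlt : ((values.set j (getA values i, 1)).eraseIdx i).length < n := by
            have hi : i < (values.set j (getA values i, 1)).length := by
              rw [List.length_set]; omega
            rw [List.length_eraseIdx]
            simp only [hi, if_pos]
            rw [List.length_set]
            omega
          exact ih _ hlt _ rfl
      · rename_i heq
        rw [hA] at heq
        simp at heq

-- ===== VERDICT (by name: the statement is the Claim_ definition above) =====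
theorem strategy_3_spec : Claim_equal_strategy_3 := by
  intro values _ _
  unfold Spec_strategy_3 strategy_3_alt
  exact main_strategy_3 values.length values rfl
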